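-- pv_equiv track=rewrite | github.com/renanmello/wdm-rwa-metaheuristics-comparison | analise-200-loads-40-lambdas/GeneticRWADinamic2.3.py | _count_wavelength_changes
-- ===== SOURCE A (Python) =====
-- from typing import List, Tuple, Dict, Optional, Any
--
-- def _count_wavelength_changes(allocation: Dict[int, int]) -> int:
--     """Conta número de mudanças de wavelength."""
--     changes = 0
--     last_wl = None
--
--     for i in sorted(allocation.keys()):
--         if last_wl is not None and allocation[i] != last_wl:
--             changes += 1
--         last_wl = allocation[i]
--
--     return changes
-- ===== SOURCE B (Python) =====
-- def _count_wavelength_changes(allocation):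
--     """Conta número de mudanças de wavelength."""
--     changes = 0
--     for k in allocation:
--         larger = [j for j in allocation if j > k]
--         if larger and allocation[min(larger)] != allocation[k]:
--             changes += 1
--     return changes
-- ===== Notes on version B (the rewrite author's own statement) =====
-- stated objective: alternative
-- what changed: Instead of sorting the keys and scanning with a last-wavelength state variable, B never sorts: for each key independently it finds the next-larger key by a min over a filtered key list and counts the keys whose successor carries a different wavelength; correct because adjacent pairs in sorted order are exactly the (key, next-larger-key) pairs.
import Mathlib
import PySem

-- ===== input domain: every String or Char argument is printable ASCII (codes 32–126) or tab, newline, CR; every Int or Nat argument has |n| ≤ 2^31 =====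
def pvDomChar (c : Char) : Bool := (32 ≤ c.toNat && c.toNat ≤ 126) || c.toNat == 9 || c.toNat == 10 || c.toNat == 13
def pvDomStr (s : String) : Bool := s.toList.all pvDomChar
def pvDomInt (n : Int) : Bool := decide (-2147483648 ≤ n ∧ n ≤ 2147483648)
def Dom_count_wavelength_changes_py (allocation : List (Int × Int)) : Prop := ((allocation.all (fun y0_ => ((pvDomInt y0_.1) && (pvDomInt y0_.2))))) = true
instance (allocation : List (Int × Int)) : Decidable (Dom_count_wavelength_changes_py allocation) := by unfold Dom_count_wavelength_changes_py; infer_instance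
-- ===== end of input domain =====

-- B drops the sort and the running last-wavelength state: for each key it finds the
-- next-larger key with a min over a filtered key list and counts the keys whose
-- successor holds a different wavelength (objective: alternative; not faster).


-- ===== PORT A =====
-- A's for-loop over sorted(allocation.keys()) carrying (changes, last_wl).
-- allocation[i] is exact as getD here: every i comes from the dict's own keys.
def pvLoopA (d : PySem.Dict Int Int) (ks : List Int) (changes : Int) (last_wl : Option Int) : Int :=
  match ks with
  | [] => changes
  | i :: rest =>
    let v := d.getD i 0
    let changes' := match last_wl with
      | some lw => if v ≠ lw then changes + 1 else changes
      | none => changes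
    pvLoopA d rest changes' (some v)

def count_wavelength_changes_py (allocation : List (Int × Int)) : Int :=
  let d := PySem.Dict.ofList allocation
  pvLoopA d (PySem.List.sorted d.keys (fun x => x) false) 0 none

-- ===== PORT B =====
-- body of B's for-loop: larger = [j for j in allocation if j > k];
-- if larger and allocation[min(larger)] != allocation[k]: changes += 1
-- (min(larger) over a nonempty list = PySem.List.min?; both lookups hit existing keys, exact as getD)
def pvStepB (d : PySem.Dict Int Int) (keys : List Int) (changes : Int) (k : Int) : Int :=
  let larger := keys.filter (fun j => decide (k < j))
  match PySem.List.min? larger (fun x => x) with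
  | some m => if d.getD m 0 ≠ d.getD k 0 then changes + 1 else changes
  | none => changes

def count_wavelength_changes_py_alt (allocation : List (Int × Int)) : Int :=
  let d := PySem.Dict.ofList allocation
  let keys := d.keys
  keys.foldl (pvStepB d keys) 0

-- ===== PRECONDITION & SPEC =====
def Spec_count_wavelength_changes_py (allocation : List (Int × Int)) (out : Int) : Prop := out = count_wavelength_changes_py_alt allocation
instance (allocation : List (Int × Int)) (out : Int) : Decidable (Spec_count_wavelength_changes_py allocation out) := by unfold Spec_count_wavelength_changes_py; infer_instance

-- ===== CLAIM (what is proved, stated in full; the proofs are below) =====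
def Claim_equal_count_wavelength_changes_py : Prop := ∀ (allocation : List (Int × Int)), Dom_count_wavelength_changes_py allocation → Spec_count_wavelength_changes_py allocation (count_wavelength_changes_py allocation)

-- ===== LEMMAS AND PROOFS =====

-- Boolean "k has a next-larger key in L whose wavelength differs"
def pvPredB (d : PySem.Dict Int Int) (L : List Int) (k : Int) : Bool :=
  match PySem.List.min? (L.filter (fun j => decide (k < j))) (fun x => x) with
  | some m => decide (¬ d.getD m 0 = d.getD k 0)
  | none => false

theorem pv_stepB_eq (d : PySem.Dict Int Int) (L : List Int) (c k : Int) :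
    pvStepB d L c k = c + (if pvPredB d L k then 1 else 0) := by
  unfold pvStepB pvPredB
  cases h : PySem.List.min? (L.filter (fun j => decide (k < j))) (fun x => x) with
  | none => simp [h]
  | some m =>
    simp only [h]
    by_cases hv : d.getD m 0 = d.getD k 0 <;> simp [hv]

theorem pv_foldB (d : PySem.Dict Int Int) (L : List Int) :
    ∀ (ks : List Int) (c : Int), ks.foldl (pvStepB d L) c = c + (ks.countP (pvPredB d L) : Int) := by
  intro ks
  induction ks with
  | nil => intro c; simp
  | cons a t ih =>
    intro c
    simp only [List.foldl_cons, ih, pv_stepB_eq, List.countP_cons]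
    by_cases h : pvPredB d L a = true <;> simp [h] <;> ring

theorem pv_min?_eq_head (b : Int) (t : List Int) (h : ∀ y ∈ t, b ≤ y) :
    PySem.List.min? (b :: t) (fun x => x) = some b := by
  rw [PySem.List.min?_id_cons]
  have h1 := (PySem.List.foldl_min_le t b).1
  rcases PySem.List.foldl_min_mem t b with h2 | h2
  · rw [h2]
  · have := h _ h2
    simp only [Option.some.injEq]
    omega

theorem pv_min?_perm (l1 l2 : List Int) (h : l1.Perm l2) :
    PySem.List.min? l1 (fun x => x) = PySem.List.min? l2 (fun x => x) := by
  cases h1 : PySem.List.min? l1 (fun x => x) with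
  | none =>
    have he : l1 = [] := (PySem.List.min?_eq_none_iff _ _).1 h1
    subst he
    have he2 : l2 = [] := h.symm.eq_nil
    subst he2
    exact ((PySem.List.min?_eq_none_iff _ _).2 rfl).symm
  | some m1 =>
    cases h2 : PySem.List.min? l2 (fun x => x) with
    | none =>
      have he : l2 = [] := (PySem.List.min?_eq_none_iff _ _).1 h2
      subst he
      have hm := PySem.List.min?_mem h1
      exact absurd (h.subset hm) (by simp)
    | some m2 =>
      have hm1 := PySem.List.min?_mem h1
      have hm2 := PySem.List.min?_mem h2
      have hle1 := PySem.List.min?_isMin h1 m2 (h.symm.subset hm2)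
      have hle2 := PySem.List.min?_isMin h2 m1 (h.subset hm1)
      simp at hle1 hle2 ⊢
      omega

theorem pvPredB_congr (d : PySem.Dict Int Int) (L1 L2 : List Int) (h : L1.Perm L2) (k : Int) :
    pvPredB d L1 k = pvPredB d L2 k := by
  unfold pvPredB
  rw [pv_min?_perm _ _ (h.filter _)]

theorem pv_filter_tail (a k : Int) (rest : List Int) (hlt : a < k) :
    (a :: rest).filter (fun j => decide (k < j)) = rest.filter (fun j => decide (k < j)) := by
  have hnk : ¬ (k < a) := by omega
  simp [hnk]

theorem pvPredB_tail (d : PySem.Dict Int Int) (a k : Int) (rest : List Int) (hlt : a < k) :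
    pvPredB d (a :: rest) k = pvPredB d rest k := by
  unfold pvPredB
  rw [pv_filter_tail a k rest hlt]

theorem pv_filter_head (a : Int) (rest : List Int) (h : ∀ x ∈ rest, a < x) :
    (a :: rest).filter (fun j => decide (a < j)) = rest := by
  simp only [List.filter_cons]
  rw [if_neg (by simp), List.filter_eq_self.2 (by intro x hx; simpa using h x hx)]

-- per-key counting over a strictly sorted list equals A's previous-value scan
theorem pv_A_count (d : PySem.Dict Int Int) :
    ∀ (s : List Int), s.Pairwise (· < ·) → ∀ (c : Int),
      pvLoopA d s c none = c + (s.countP (pvPredB d s) : Int) := by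
  intro s
  induction s with
  | nil => intro _ c; simp [pvLoopA]
  | cons a rest ih =>
    intro hp c
    have hpa : ∀ x ∈ rest, a < x := (List.pairwise_cons.1 hp).1
    have hpr : rest.Pairwise (· < ·) := (List.pairwise_cons.1 hp).2
    cases rest with
    | nil =>
      have hpf : pvPredB d [a] a = false := by
        unfold pvPredB
        have hf : ([a].filter fun j => decide (a < j)) = [] := by simp
        rw [hf, (PySem.List.min?_eq_none_iff ([] : List Int) _).2 rfl]
      simp [pvLoopA, hpf]
    | cons b t =>
      have hab : a < b := hpa b (by simp)
      have hbt : ∀ y ∈ t, b ≤ y := by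
        intro y hy
        have := (List.pairwise_cons.1 hpr).1 y hy
        omega
      -- head predicate: the successor of a in (a::b::t) is b
      have hhead : pvPredB d (a :: b :: t) a = decide (¬ d.getD b 0 = d.getD a 0) := by
        unfold pvPredB
        rw [pv_filter_head a (b :: t) hpa, pv_min?_eq_head b t hbt]
      -- tail predicates agree with the tail list
      have htail : (b :: t).countP (pvPredB d (a :: b :: t)) = (b :: t).countP (pvPredB d (b :: t)) := by
        apply List.countP_congr
        intro x hx
        rw [pvPredB_tail d a x (b :: t) (hpa x hx)]
      -- unroll A's first two steps into a fresh run on (b :: t)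
      have hA : pvLoopA d (a :: b :: t) c none
          = pvLoopA d (b :: t) (if d.getD b 0 ≠ d.getD a 0 then c + 1 else c) none := by
        simp [pvLoopA]
      have hcount : (a :: b :: t).countP (pvPredB d (a :: b :: t))
          = (b :: t).countP (pvPredB d (b :: t)) + (if pvPredB d (a :: b :: t) a then 1 else 0) := by
        rw [List.countP_cons, htail]
      rw [hA, ih hpr, hcount, hhead]
      by_cases h : d.getD b 0 = d.getD a 0 <;> simp [h] <;> ring

-- ===== VERDICT (by name: the statement is the Claim_ definition above) =====
theorem count_wavelength_changes_py_spec : Claim_equal_count_wavelength_changes_py := by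
  intro allocation _
  unfold Spec_count_wavelength_changes_py count_wavelength_changes_py count_wavelength_changes_py_alt
  set d := PySem.Dict.ofList allocation with hd
  set s := PySem.List.sorted d.keys (fun x => x) false with hs
  have hperm : s.Perm d.keys := PySem.List.sorted_perm d.keys (fun x => x) false
  have hnd : d.keys.Nodup := PySem.Dict.nodup_keys_ofList allocation
  have hsnd : s.Nodup := hperm.nodup_iff.2 hnd
  have hle : s.Pairwise (fun x y => x ≤ y) := by
    have := PySem.List.sorted_pairwise d.keys (fun x => x)
    simpa using this
  have hlt : s.Pairwise (· < ·) := by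
    have := List.Pairwise.and hle hsnd
    exact this.imp (fun h => lt_of_le_of_ne h.1 h.2)
  rw [pv_foldB, pv_A_count d s hlt]
  have h1 : s.countP (pvPredB d s) = d.keys.countP (pvPredB d s) := hperm.countP_eq _
  have h2 : d.keys.countP (pvPredB d s) = d.keys.countP (pvPredB d d.keys) :=
    List.countP_congr (fun x _ => by rw [pvPredB_congr d s d.keys hperm x])
  rw [h1, h2]
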